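-- pv_equiv track=rewrite | github.com/JinYuKiKK0/Stata-Executor-MCP | infra/stata_engine.py | _build_execution_summary
-- ===== SOURCE A (Python) =====
-- def _build_execution_summary(text: str, exit_code: int) -> str:
--     if exit_code == 0:
--         return "Stata job completed successfully."
--
--     for raw_line in text.splitlines():
--         line = raw_line.strip()
--         if not line:
--             continue
--         if line.startswith("__AGENT_RC__") or line.startswith(". "):
--             continue
--         if line.startswith("r("):
--             continue
--         low = line.lower()
--         if "invalid syntax" in low or "unrecognized" in low or "error" in low:
--             return f"Stata failed with exit_code={exit_code}: {line}"
--
--     generic = [line.strip() for line in text.splitlines() if line.strip().startswith("r(")]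
--     if generic:
--         return f"Stata failed with exit_code={exit_code}: {generic[-1]}"
--     return f"Stata failed with exit_code={exit_code}."
-- ===== SOURCE B (Python) =====
-- def _build_execution_summary(text: str, exit_code: int) -> str:
--     if exit_code == 0:
--         return "Stata job completed successfully."
--
--     last_generic = None
--     for raw_line in text.splitlines():
--         line = raw_line.strip()
--         if not line or line.startswith("__AGENT_RC__") or line.startswith(". "):
--             continue
--         if line.startswith("r("):
--             last_generic = line
--             continue
--         low = line.lower()
--         if "invalid syntax" in low or "unrecognized" in low or "error" in low:
--             return f"Stata failed with exit_code={exit_code}: {line}"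
--
--     if last_generic is not None:
--         return f"Stata failed with exit_code={exit_code}: {last_generic}"
--     return f"Stata failed with exit_code={exit_code}."
-- ===== Notes on version B (the rewrite author's own statement) =====
-- stated objective: simpler
-- what changed: A's two separate splitlines scans (an error-search loop plus a second full comprehension collecting r(...) lines) are fused into one pass that carries a single last_generic accumulator, so the log is traversed once.
import Mathlib
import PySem

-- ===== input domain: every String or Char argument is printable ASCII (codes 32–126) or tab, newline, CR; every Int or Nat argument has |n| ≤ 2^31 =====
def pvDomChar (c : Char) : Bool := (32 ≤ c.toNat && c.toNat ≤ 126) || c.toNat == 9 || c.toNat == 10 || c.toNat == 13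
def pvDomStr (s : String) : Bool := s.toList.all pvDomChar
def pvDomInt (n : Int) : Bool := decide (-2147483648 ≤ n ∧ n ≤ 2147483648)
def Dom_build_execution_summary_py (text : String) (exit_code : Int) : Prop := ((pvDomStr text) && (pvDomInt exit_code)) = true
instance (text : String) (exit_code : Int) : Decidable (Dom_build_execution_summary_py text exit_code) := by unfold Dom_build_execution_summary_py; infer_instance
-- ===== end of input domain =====

-- B replaces A's two separate scans of the split log (an error-search loop, then a second
-- full comprehension collecting the "r(" lines) with one pass carrying a last_generic
-- accumulator (objective: simpler, one traversal).

-- ===== PORT A =====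
-- A's first loop: the early-return error message, if any (none = the loop fell through).
def pvA_findErr (ec : Int) : List String → Option String
  | [] => none
  | raw :: rest =>
    let line := PySem.Str.strip raw
    if line = "" then pvA_findErr ec rest
    else if PySem.Str.startswith line "__AGENT_RC__" || PySem.Str.startswith line ". " then
      pvA_findErr ec rest
    else if PySem.Str.startswith line "r(" then pvA_findErr ec rest
    else
      let low := PySem.Str.lower line
      if PySem.Str.isIn "invalid syntax" low || PySem.Str.isIn "unrecognized" low || PySem.Str.isIn "error" low then
        some ("Stata failed with exit_code=" ++ PySem.Int.toStr ec ++ ": " ++ line)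
      else pvA_findErr ec rest

def build_execution_summary_py (text : String) (exit_code : Int) : String :=
  if exit_code = 0 then "Stata job completed successfully."
  else
    match pvA_findErr exit_code (PySem.Str.splitlines text) with
    | some msg => msg
    | none =>
      -- A's second pass: the comprehension over text.splitlines(), then generic[-1]
      let generic := ((PySem.Str.splitlines text).map PySem.Str.strip).filter
        (fun l => PySem.Str.startswith l "r(")
      match generic.getLast? with
      | some g => "Stata failed with exit_code=" ++ PySem.Int.toStr exit_code ++ ": " ++ g
      | none => "Stata failed with exit_code=" ++ PySem.Int.toStr exit_code ++ "."

-- ===== PORT B =====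
-- B's single loop; the Option argument is last_generic.
def pvB_loop (ec : Int) : List String → Option String → String
  | [], lg =>
    match lg with
    | some g => "Stata failed with exit_code=" ++ PySem.Int.toStr ec ++ ": " ++ g
    | none => "Stata failed with exit_code=" ++ PySem.Int.toStr ec ++ "."
  | raw :: rest, lg =>
    let line := PySem.Str.strip raw
    if line = "" || PySem.Str.startswith line "__AGENT_RC__" || PySem.Str.startswith line ". " then
      pvB_loop ec rest lg
    else if PySem.Str.startswith line "r(" then pvB_loop ec rest (some line)
    else
      let low := PySem.Str.lower line
      if PySem.Str.isIn "invalid syntax" low || PySem.Str.isIn "unrecognized" low || PySem.Str.isIn "error" low then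
        "Stata failed with exit_code=" ++ PySem.Int.toStr ec ++ ": " ++ line
      else pvB_loop ec rest lg

def build_execution_summary_py_alt (text : String) (exit_code : Int) : String :=
  if exit_code = 0 then "Stata job completed successfully."
  else pvB_loop exit_code (PySem.Str.splitlines text) none

-- ===== PRECONDITION & SPEC =====
def Spec_build_execution_summary_py (text : String) (exit_code : Int) (out : String) : Prop := out = build_execution_summary_py_alt text exit_code
instance (text : String) (exit_code : Int) (out : String) : Decidable (Spec_build_execution_summary_py text exit_code out) := by unfold Spec_build_execution_summary_py; infer_instance

-- ===== CLAIM (what is proved, stated in full; the proofs are below) =====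
def Claim_equal_build_execution_summary_py : Prop := ∀ (text : String) (exit_code : Int), Dom_build_execution_summary_py text exit_code → Spec_build_execution_summary_py text exit_code (build_execution_summary_py text exit_code)

-- ===== LEMMAS AND PROOFS =====

theorem pv_prefix_head_eq {a b : Char} {l1 l2 t : List Char}
    (h1 : (a :: l1) <+: t) (h2 : (b :: l2) <+: t) : a = b := by
  cases t with
  | nil => exact absurd h1 (by simp)
  | cons x xs =>
    rw [List.cons_prefix_cons] at h1 h2
    exact h1.1.trans h2.1.symm

theorem pv_not_r (s p : String) (c : Char) (l : List Char) (hp : p.toList = c :: l)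
    (hc : c ≠ 'r') (h : PySem.Str.startswith s p = true) :
    PySem.Str.startswith s "r(" = false := by
  simp only [PySem.Str.startswith_eq] at h ⊢
  rw [PySem.Chars.startswith_iff, hp] at h
  by_contra hcon
  rw [Bool.not_eq_false, PySem.Chars.startswith_iff] at hcon
  have hrl : ("r(".toList) = 'r' :: ['('] := by decide
  rw [hrl] at hcon
  exact hc (pv_prefix_head_eq h hcon)

theorem pv_agent_not_r (s : String) (h : PySem.Str.startswith s "__AGENT_RC__" = true) :
    PySem.Str.startswith s "r(" = false :=
  pv_not_r s _ '_' ['_','A','G','E','N','T','_','R','C','_','_'] (by decide) (by decide) h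

theorem pv_dot_not_r (s : String) (h : PySem.Str.startswith s ". " = true) :
    PySem.Str.startswith s "r(" = false :=
  pv_not_r s _ '.' [' '] (by decide) (by decide) h

theorem pv_loop_eq (ec : Int) (lines : List String) :
    ∀ lg : Option String,
    pvB_loop ec lines lg =
      match pvA_findErr ec lines with
      | some m => m
      | none =>
        match ((lines.map PySem.Str.strip).filter
            (fun l => PySem.Str.startswith l "r(")).getLast?.or lg with
        | some g => "Stata failed with exit_code=" ++ PySem.Int.toStr ec ++ ": " ++ g
        | none => "Stata failed with exit_code=" ++ PySem.Int.toStr ec ++ "." := by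
  induction lines with
  | nil =>
    intro lg
    cases lg <;> simp [pvB_loop, pvA_findErr]
  | cons raw rest ih =>
    intro lg
    by_cases he : PySem.Str.strip raw = ""
    · have h0 : PySem.Chars.startswith ([] : List Char) ['r','('] = false := by decide
      simp [pvB_loop, pvA_findErr, he, h0, ih]
    · by_cases hag : (PySem.Str.startswith (PySem.Str.strip raw) "__AGENT_RC__"
          || PySem.Str.startswith (PySem.Str.strip raw) ". ") = true
      · have hr : PySem.Str.startswith (PySem.Str.strip raw) "r(" = false := by
          rcases Bool.or_eq_true_iff.mp hag with h | h
          · exact pv_agent_not_r _ h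
          · exact pv_dot_not_r _ h
        have hag' := hag
        simp at hag'
        have hr' := hr
        simp at hr'
        simp [pvB_loop, pvA_findErr, he, hag', hr', ih]
      · rw [Bool.not_eq_true] at hag
        have hag' := hag
        simp at hag'
        by_cases hr : PySem.Str.startswith (PySem.Str.strip raw) "r(" = true
        · have hr' := hr
          simp at hr'
          rw [show pvB_loop ec (raw :: rest) lg = pvB_loop ec rest (some (PySem.Str.strip raw)) from by
                simp [pvB_loop, he, hag'.1, hag'.2, hr'],
              ih (some (PySem.Str.strip raw))]
          cases hfe : pvA_findErr ec rest with
          | some m => simp [pvA_findErr, he, hag'.1, hag'.2, hr', hfe]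
          | none => simp [pvA_findErr, he, hag'.1, hag'.2, hr', hfe, List.getLast?_cons]
        · rw [Bool.not_eq_true] at hr
          have hr' := hr
          simp at hr'
          by_cases herr :
              (PySem.Str.isIn "invalid syntax" (PySem.Str.lower (PySem.Str.strip raw))
               || PySem.Str.isIn "unrecognized" (PySem.Str.lower (PySem.Str.strip raw))
               || PySem.Str.isIn "error" (PySem.Str.lower (PySem.Str.strip raw))) = true
          · have herr' := herr
            simp at herr'
            simp [pvB_loop, pvA_findErr, he, hag'.1, hag'.2, hr', herr']
          · rw [Bool.not_eq_true] at herr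
            have herr' := herr
            simp at herr'
            simp [pvB_loop, pvA_findErr, he, hag'.1, hag'.2, hr', herr', ih]

-- ===== VERDICT (by name: the statement is the Claim_ definition above) =====
theorem build_execution_summary_py_spec : Claim_equal_build_execution_summary_py := by
  intro text ec _
  unfold Spec_build_execution_summary_py build_execution_summary_py build_execution_summary_py_alt
  by_cases h0 : ec = 0
  · simp [h0]
  · rw [if_neg h0, if_neg h0, pv_loop_eq]
    cases hfe : pvA_findErr ec (PySem.Str.splitlines text) with
    | some m => simp
    | none => simp
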